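-- pv_equiv track=rewrite | github.com/eduardoftoliveira/oniomMacGyver | modules/Gaussian/RouteSection.py | digest_spaces
-- ===== SOURCE A (Python) =====
-- def digest_spaces(rsline, sign):
--     """remove spaces around char specified in input
--         example:
--             opt = (maxmicro = 50)
--         becomes...
--              opt=(maxmicro=50), for sign="="
--     """
--     newstr = ''
--     fields = rsline.split(sign)
--     newfields = []
--     for i in range(1, len(fields)-1):
--         newfields.append(fields[i].strip())
--     if len(fields) > 1:
--         newfields.insert(0, fields[0].rstrip())
--         newfields.append(fields[-1].lstrip())
--     else:
--         return rsline
--     return sign.join(newfields)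
-- ===== SOURCE B (Python) =====
-- def digest_spaces(rsline, sign):
--     """remove spaces around char specified in input (single left-to-right scan)"""
--     if sign == '':
--         raise ValueError('empty separator')
--     out = []
--     cur = []
--     i = 0
--     n = len(rsline)
--     k = len(sign)
--     while i < n:
--         if rsline[i:i + k] == sign:
--             while cur and cur[-1].isspace():
--                 cur.pop()
--             out.append(''.join(cur))
--             out.append(sign)
--             cur = []
--             i += k
--             while i < n and rsline[i].isspace() and rsline[i:i + k] != sign:
--                 i += 1
--         else:
--             cur.append(rsline[i])
--             i += 1
--     out.append(''.join(cur))
--     return ''.join(out) if len(out) > 1 else rsline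
-- ===== Notes on version B (the rewrite author's own statement) =====
-- stated objective: alternative
-- what changed: Replaces A's split-into-fields / strip-each-field-positionally / rejoin pipeline by a single left-to-right scan that copies characters, dropping the whitespace buffered just before each separator occurrence and skipping the whitespace right after it.
import Mathlib
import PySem

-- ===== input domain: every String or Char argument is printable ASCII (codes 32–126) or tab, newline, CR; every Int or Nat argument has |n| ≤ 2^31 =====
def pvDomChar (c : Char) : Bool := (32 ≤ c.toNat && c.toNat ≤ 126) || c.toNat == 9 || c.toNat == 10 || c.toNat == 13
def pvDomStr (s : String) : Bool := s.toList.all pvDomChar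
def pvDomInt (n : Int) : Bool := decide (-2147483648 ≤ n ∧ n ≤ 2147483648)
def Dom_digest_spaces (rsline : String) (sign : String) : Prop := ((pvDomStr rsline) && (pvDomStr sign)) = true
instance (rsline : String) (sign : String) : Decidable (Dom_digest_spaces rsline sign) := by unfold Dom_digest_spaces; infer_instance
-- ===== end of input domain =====

-- B replaces A's split/strip-each-field/join pipeline by a single left-to-right scan that
-- emits the separator and drops the whitespace just before/after each occurrence (objective: alternative).

-- ===== PORT A =====
def digest_spaces (rsline : String) (sign : String) : String :=
  match PySem.Str.split? rsline sign with
  | none => rsline  -- sign = "": Python raises ValueError here; excluded by Pre_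
  | some fields =>
    let newfields : List String :=
      (PySem.List.pyRange 1 ((fields.length : Int) - 1) 1).foldl
        (fun acc i => acc ++ [PySem.Str.strip (PySem.List.pyGetD fields i "")]) []
    if fields.length > 1 then
      PySem.Str.join sign
        (PySem.Str.rstrip (PySem.List.pyGetD fields 0 "") ::
          newfields ++ [PySem.Str.lstrip (PySem.List.pyGetD fields (-1) "")])
    else rsline

-- ===== PORT B =====
-- the inner `while i < n and rsline[i].isspace() and rsline[i:i+k] != sign: i += 1` loop
def pvSkipWs (sg : List Char) : List Char → List Char
  | [] => []
  | c :: rest =>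
    if PySem.Chars.isspace c && !(PySem.Chars.startswith (c :: rest) sg) then pvSkipWs sg rest
    else c :: rest

-- the `while cur and cur[-1].isspace(): cur.pop()` loop (drop trailing whitespace chars)
def pvPopTrailWs (cur : List Char) : List Char :=
  (cur.reverse.dropWhile PySem.Chars.isspace).reverse

theorem pvSkipWs_length_le (sg : List Char) (l : List Char) :
    (pvSkipWs sg l).length ≤ l.length := by
  induction l with
  | nil => simp [pvSkipWs]
  | cons c rest ih =>
    simp only [pvSkipWs]
    split
    · exact le_trans ih (by simp)
    · simp

-- the main `while i < n` loop of B; state = (rest of string, current field buffer, output pieces)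
def pvScan (sg : List Char) (hs : sg ≠ []) : List Char → List Char → List String → List String
  | rest, cur, out =>
    if PySem.Chars.startswith rest sg then
      pvScan sg hs (pvSkipWs sg (rest.drop sg.length)) []
        (out ++ [String.ofList (pvPopTrailWs cur), String.ofList sg])
    else
      match rest with
      | [] => out ++ [String.ofList cur]
      | c :: rest' => pvScan sg hs rest' (cur ++ [c]) out
  termination_by rest => rest.length
  decreasing_by
  · rename_i h
    have hpre : sg <+: rest := by
      rw [PySem.Chars.startswith] at h
      exact List.isPrefixOf_iff_prefix.mp h
    have h1 : 1 ≤ sg.length := by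
      cases sg with
      | nil => exact absurd rfl hs
      | cons a b => simp
    have h2 : sg.length ≤ rest.length := hpre.length_le
    calc (pvSkipWs sg (rest.drop sg.length)).length
        ≤ (rest.drop sg.length).length := pvSkipWs_length_le _ _
      _ = rest.length - sg.length := by simp
      _ < rest.length := by omega
  · simp

def digest_spaces_alt (rsline : String) (sign : String) : String :=
  if h : sign.toList = [] then rsline  -- sign = "": Python B raises ValueError; excluded by Pre_
  else
    let out := pvScan sign.toList h rsline.toList [] []
    if out.length > 1 then PySem.Str.join "" out else rsline

-- ===== PRECONDITION & SPEC =====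
-- Pre_ excludes only sign = "", on which both A (str.split('')) and B raise ValueError.
def Pre_digest_spaces (rsline : String) (sign : String) : Prop := sign ≠ ""
instance (rsline : String) (sign : String) : Decidable (Pre_digest_spaces rsline sign) := by
  unfold Pre_digest_spaces; infer_instance

def pvWitness_digest_spaces : String × String := ("opt = (maxmicro = 50)", "=")

def Spec_digest_spaces (rsline : String) (sign : String) (out : String) : Prop :=
  out = digest_spaces_alt rsline sign
instance (rsline : String) (sign : String) (out : String) : Decidable (Spec_digest_spaces rsline sign out) := by
  unfold Spec_digest_spaces; infer_instance

-- ===== CLAIM (what is proved, stated in full; the proofs are below) =====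
def Claim_equal_digest_spaces : Prop := ∀ (rsline : String) (sign : String),
  Dom_digest_spaces rsline sign → Pre_digest_spaces rsline sign →
  Spec_digest_spaces rsline sign (digest_spaces rsline sign)

-- ===== LEMMAS AND PROOFS =====

-- the Python-split fields of a string, written as the natural structural recursion
def pvSp (sg : List Char) (hs : sg ≠ []) : List Char → List (List Char)
  | [] => [[]]
  | c :: rest =>
    if PySem.Chars.startswith (c :: rest) sg then
      [] :: pvSp sg hs ((c :: rest).drop sg.length)
    else
      (pvSp sg hs rest).modifyHead (c :: ·)
  termination_by l => l.length
  decreasing_by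
  · have h1 : 1 ≤ sg.length := by
      cases sg with
      | nil => exact absurd rfl hs
      | cons a b => simp
    simp
    omega
  · simp

theorem pvSp_ne_nil (sg : List Char) (hs : sg ≠ []) (l : List Char) : pvSp sg hs l ≠ [] := by
  fun_induction pvSp with
  | case1 => simp
  | case2 => simp
  | case3 c rest hpre ih =>
    cases h : pvSp sg hs rest with
    | nil => exact absurd h ih
    | cons p ps => simp [h]

-- skipping leading whitespace (that does not start a separator match) lstrips the first field
theorem pvSp_skipWs (sg : List Char) (hs : sg ≠ []) (l : List Char) :
    pvSp sg hs (pvSkipWs sg l) = (pvSp sg hs l).modifyHead PySem.Chars.lstrip := by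
  induction l with
  | nil => simp [pvSkipWs, pvSp, PySem.Chars.lstrip]
  | cons c rest ih =>
    by_cases hw : (PySem.Chars.isspace c && !(PySem.Chars.startswith (c :: rest) sg)) = true
    · rw [show pvSkipWs sg (c :: rest) = pvSkipWs sg rest by rw [pvSkipWs]; simp [hw]]
      rw [ih]
      have hnp : PySem.Chars.startswith (c :: rest) sg = false := by
        simp only [Bool.and_eq_true, Bool.not_eq_true'] at hw
        exact hw.2
      rw [show pvSp sg hs (c :: rest) = (pvSp sg hs rest).modifyHead (c :: ·) by
        rw [pvSp]; simp [hnp]]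
      have hws : PySem.Chars.isspace c = true := by
        simp only [Bool.and_eq_true] at hw
        exact hw.1
      cases hsp : pvSp sg hs rest with
      | nil => exact absurd hsp (pvSp_ne_nil sg hs rest)
      | cons p ps =>
        simp only [List.modifyHead]
        congr 1
        simp [PySem.Chars.lstrip, List.dropWhile, hws]
    · rw [show pvSkipWs sg (c :: rest) = c :: rest by rw [pvSkipWs]; simp [hw]]
      by_cases hp : PySem.Chars.startswith (c :: rest) sg = true
      · rw [show pvSp sg hs (c :: rest) = [] :: pvSp sg hs ((c :: rest).drop sg.length) by
          rw [pvSp]; simp [hp]]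
        simp [PySem.Chars.lstrip]
      · have hnp : PySem.Chars.startswith (c :: rest) sg = false := by
          simpa using hp
        have hws : PySem.Chars.isspace c = false := by
          cases hic : PySem.Chars.isspace c with
          | false => rfl
          | true => exact absurd (by simp [hic, hnp]) hw
        rw [show pvSp sg hs (c :: rest) = (pvSp sg hs rest).modifyHead (c :: ·) by
          rw [pvSp]; simp [hp]]
        cases hsp : pvSp sg hs rest with
        | nil => exact absurd hsp (pvSp_ne_nil sg hs rest)
        | cons p ps =>
          simp only [List.modifyHead]
          congr 1
          simp [PySem.Chars.lstrip, List.dropWhile, hws]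

-- PySem's fuel-based split equals pvSp
theorem pvSplitOn_go_eq (sg : List Char) (hs : sg ≠ []) :
    ∀ (fuel : Nat) (l cur : List Char) (acc : List (List Char)), l.length < fuel →
      PySem.Chars.splitOn.go sg fuel l cur acc
        = acc.reverse ++ (pvSp sg hs l).modifyHead (cur.reverse ++ ·) := by
  intro fuel
  induction fuel with
  | zero => intro l cur acc h; omega
  | succ fuel ih =>
    intro l cur acc h
    cases l with
    | nil =>
      simp [PySem.Chars.splitOn.go, pvSp]
    | cons c rest =>
      rw [show PySem.Chars.splitOn.go sg (fuel + 1) (c :: rest) cur acc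
            = if sg.isPrefixOf (c :: rest) = true then
                PySem.Chars.splitOn.go sg fuel ((c :: rest).drop sg.length) [] (cur.reverse :: acc)
              else PySem.Chars.splitOn.go sg fuel rest (c :: cur) acc from rfl]
      by_cases hp : sg.isPrefixOf (c :: rest) = true
      · have h1 : 1 ≤ sg.length := by
          cases sg with
          | nil => exact absurd rfl hs
          | cons a b => simp
        rw [if_pos hp, ih _ _ _ (by have := h; simp at this ⊢; omega)]
        rw [show pvSp sg hs (c :: rest) = [] :: pvSp sg hs ((c :: rest).drop sg.length) by
          rw [pvSp]; simp [PySem.Chars.startswith, hp]]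
        cases hsp : pvSp sg hs ((c :: rest).drop sg.length) with
        | nil => exact absurd hsp (pvSp_ne_nil sg hs _)
        | cons p ps => simp [List.modifyHead]
      · rw [if_neg hp, ih _ _ _ (by simp at h ⊢; omega)]
        rw [show pvSp sg hs (c :: rest) = (pvSp sg hs rest).modifyHead (c :: ·) by
          rw [pvSp]; simp [PySem.Chars.startswith, hp]]
        cases hsp : pvSp sg hs rest with
        | nil => exact absurd hsp (pvSp_ne_nil sg hs rest)
        | cons p ps => simp [List.modifyHead]

theorem pvSplitOn_eq (sg : List Char) (hs : sg ≠ []) (l : List Char) :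
    PySem.Chars.splitOn l sg = pvSp sg hs l := by
  rw [PySem.Chars.splitOn, pvSplitOn_go_eq sg hs (l.length + 1) l [] [] (by omega)]
  cases hsp : pvSp sg hs l with
  | nil => exact absurd hsp (pvSp_ne_nil sg hs l)
  | cons p ps => simp [List.modifyHead]

-- the list of pieces B's scan will append for given current buffer and remaining fields
def pvRender (sg : List Char) : List Char → List (List Char) → List String
  | cur, [] => []
  | cur, [f] => [String.ofList (cur ++ f)]
  | cur, f0 :: f1 :: fs =>
    String.ofList (PySem.Chars.rstrip (cur ++ f0)) :: String.ofList sg ::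
      pvRender sg [] ((f1 :: fs).modifyHead PySem.Chars.lstrip)
  termination_by _ fields => fields.length
  decreasing_by simp

theorem pvRender_shift (sg : List Char) (cur : List Char) (c : Char)
    (fields : List (List Char)) (h : fields ≠ []) :
    pvRender sg (cur ++ [c]) fields = pvRender sg cur (fields.modifyHead (c :: ·)) := by
  match fields with
  | [] => exact absurd rfl h
  | [f] => simp [pvRender, List.modifyHead]
  | f0 :: f1 :: fs => simp [pvRender, List.modifyHead, List.append_assoc]

theorem pvPopTrailWs_eq_rstrip (cur : List Char) : pvPopTrailWs cur = PySem.Chars.rstrip cur := rfl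

-- loop invariant of B's scan: it appends exactly the rendering of the remaining fields
theorem pvScan_render (sg : List Char) (hs : sg ≠ []) :
    ∀ (rest cur : List Char) (out : List String),
      pvScan sg hs rest cur out = out ++ pvRender sg cur (pvSp sg hs rest) := by
  intro rest cur out
  fun_induction pvScan with
  | case1 rest cur out hp ih =>
    -- separator matches at the front
    have hrest : rest ≠ [] := by
      intro h
      subst h
      cases sg with
      | nil => exact hs rfl
      | cons a b => simp [PySem.Chars.startswith, List.isPrefixOf] at hp
    have hspl : pvSp sg hs rest = [] :: pvSp sg hs (rest.drop sg.length) := by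
      cases rest with
      | nil => exact absurd rfl hrest
      | cons c r => rw [pvSp]; simp [hp]
    rw [ih, hspl, pvSp_skipWs, pvPopTrailWs_eq_rstrip]
    cases hsp : pvSp sg hs (rest.drop sg.length) with
    | nil => exact absurd hsp (pvSp_ne_nil sg hs _)
    | cons g0 gs =>
      simp only [List.modifyHead]
      rw [pvRender]
      simp [List.modifyHead]
  | case2 cur out hp =>
    simp [pvSp, pvRender]
  | case3 cur out c rest' hp ih =>
    rw [ih]
    rw [show pvSp sg hs (c :: rest') = (pvSp sg hs rest').modifyHead (c :: ·) by
      rw [pvSp]; simp [hp]]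
    rw [pvRender_shift sg cur c _ (pvSp_ne_nil sg hs rest')]

-- take m elements, mapped, via an index loop over range m
theorem pvMap_range_getD {α β : Type} (g : α → β) (d : α) :
    ∀ (xs : List α) (m : Nat), m ≤ xs.length →
      (List.range m).map (fun k => g (xs.getD k d)) = (xs.take m).map g := by
  intro xs
  induction xs with
  | nil =>
    intro m hm
    obtain rfl := Nat.le_zero.mp hm
    simp
  | cons x ys ih =>
    intro m hm
    cases m with
    | zero => simp
    | succ m' =>
      rw [List.range_succ_eq_map]
      simp only [List.map_cons, List.map_map]
      rw [show ((fun k => g ((x :: ys).getD k d)) ∘ Nat.succ) = fun k => g (ys.getD k d) from rfl]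
      rw [ih m' (by simpa using hm)]
      simp

-- A's middle loop, over fields = f0 :: fs, collects the stripped middle fields
theorem pvMid {α β : Type} (g : α → β) (d : α) (f0 : α) (fs : List α) :
    (PySem.List.pyRange 1 (((f0 :: fs).length : Int) - 1) 1).map
        (fun i => g (PySem.List.pyGetD (f0 :: fs) i d)) = fs.dropLast.map g := by
  rw [PySem.List.pyRange_one]
  rw [List.map_map]
  have : ((fun i => g (PySem.List.pyGetD (f0 :: fs) i d)) ∘ fun (k : Nat) => (1 : Int) + ↑k)
      = fun (k : Nat) => g (fs.getD k d) := by
    funext k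
    simp only [Function.comp]
    rw [show (1 : Int) + (k : Int) = ((k + 1 : Nat) : Int) by push_cast; ring]
    rw [PySem.List.pyGetD_natCast]
    rfl
  rw [this]
  have hlen : ((((f0 :: fs).length : Int) - 1 - 1).toNat) = fs.length - 1 := by
    simp only [List.length_cons]
    omega
  rw [hlen]
  rw [pvMap_range_getD g d fs (fs.length - 1) (by omega)]
  rw [List.dropLast_eq_take]

theorem pvJoin_nil_cons (a : List Char) (rest : List (List Char)) :
    PySem.Chars.join [] (a :: rest) = a ++ PySem.Chars.join [] rest := by
  cases rest with
  | nil => simp [PySem.Chars.join_singleton, PySem.Chars.join_nil]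
  | cons b r => simp [PySem.Chars.join_cons_cons]

theorem pvJoin_cons (sep a : List Char) (rest : List (List Char)) (h : rest ≠ []) :
    PySem.Chars.join sep (a :: rest) = a ++ sep ++ PySem.Chars.join sep rest := by
  cases rest with
  | nil => exact absurd rfl h
  | cons b r => exact PySem.Chars.join_cons_cons sep a b r

-- joining B's rendered pieces with '' equals A's sign-join of the stripped fields
theorem pvRender_join (sg : List Char) :
    ∀ (fs : List (List Char)) (f1 f0 cur : List Char),
      PySem.Chars.join [] ((pvRender sg cur (f0 :: f1 :: fs)).map String.toList)
        = PySem.Chars.join sg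
            (PySem.Chars.rstrip (cur ++ f0) ::
              ((f1 :: fs).dropLast.map PySem.Chars.strip
                ++ [PySem.Chars.lstrip ((f1 :: fs).getLast (by simp))])) := by
  intro fs
  induction fs with
  | nil =>
    intro f1 f0 cur
    simp [pvRender, List.modifyHead, PySem.Chars.join, List.intercalate]
  | cons f2 fs' ih =>
    intro f1 f0 cur
    rw [show pvRender sg cur (f0 :: f1 :: f2 :: fs')
          = String.ofList (PySem.Chars.rstrip (cur ++ f0)) :: String.ofList sg ::
              pvRender sg [] (PySem.Chars.lstrip f1 :: f2 :: fs') by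
      rw [pvRender]; simp [List.modifyHead]]
    simp only [List.map_cons, String.toList_ofList]
    rw [pvJoin_nil_cons, pvJoin_nil_cons]
    rw [ih f2 (PySem.Chars.lstrip f1) []]
    rw [pvJoin_cons sg (PySem.Chars.rstrip (cur ++ f0)) _ (by simp)]
    rw [List.dropLast_cons₂, List.map_cons, List.cons_append]
    rw [pvJoin_cons sg (PySem.Chars.strip f1) _ (by simp)]
    rw [pvJoin_cons sg (PySem.Chars.rstrip ([] ++ PySem.Chars.lstrip f1)) _ (by simp)]
    rw [List.getLast_cons (by simp : (f2 :: fs') ≠ [])]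
    simp [PySem.Chars.strip, List.append_assoc]

-- ===== VERDICT (by name: the statement is the Claim_ definition above) =====
theorem digest_spaces_spec : Claim_equal_digest_spaces := by
  intro rsline sign hdom hpre
  unfold Spec_digest_spaces
  have hs : sign.toList ≠ [] := by
    intro h
    exact hpre (String.toList_eq_nil_iff.mp h)
  -- reduce A's split to pvSp
  have hsplit : PySem.Str.split? rsline sign
      = some ((pvSp sign.toList hs rsline.toList).map String.ofList) := by
    rw [PySem.Str.split?, PySem.Chars.split?]
    rw [if_neg (by simpa [List.isEmpty_iff] using hs)]
    rw [pvSplitOn_eq sign.toList hs rsline.toList]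
    rfl
  -- reduce B's scan to pvRender
  have hscan : pvScan sign.toList hs rsline.toList [] []
      = pvRender sign.toList [] (pvSp sign.toList hs rsline.toList) := by
    rw [pvScan_render sign.toList hs rsline.toList [] []]
    simp
  rw [digest_spaces, digest_spaces_alt, hsplit, dif_neg hs]
  simp only []
  cases hsp : pvSp sign.toList hs rsline.toList with
  | nil => exact absurd hsp (pvSp_ne_nil sign.toList hs rsline.toList)
  | cons f0 Fs =>
    cases Fs with
    | nil =>
      -- single field: both return rsline
      rw [if_neg (by simp)]
      rw [hscan, hsp]
      rw [show pvRender sign.toList [] [f0] = [String.ofList ([] ++ f0)] from by rw [pvRender]]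
      rw [if_neg (by simp)]
    | cons f1 fs =>
      rw [if_pos (by simp)]
      rw [hscan, hsp]
      have hlen2 : 1 < (pvRender sign.toList [] (f0 :: f1 :: fs)).length := by
        rw [pvRender]
        simp
      rw [if_pos hlen2]
      apply String.toList_inj.mp
      rw [PySem.Str.toList_join, PySem.Str.toList_join]
      rw [show ("" : String).toList = [] from rfl]
      rw [pvRender_join sign.toList fs f1 f0 []]
      -- A side: fold the middle loop into a map, then identify the pieces
      rw [PySem.List.foldl_append_singleton_eq_map]
      rw [List.nil_append]
      rw [List.map_cons]
      rw [pvMid (fun s => PySem.Str.strip s) "" (String.ofList f0) ((f1 :: fs).map String.ofList)]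
      rw [PySem.List.pyGetD_zero_cons]
      rw [PySem.List.pyGetD_neg_one _ _ (by simp)]
      simp only [List.map_cons, List.map_append, List.map_map, List.cons_append,
        PySem.Str.toList_rstrip, PySem.Str.toList_lstrip, PySem.Str.toList_strip,
        String.toList_ofList, List.map_dropLast]
      have hgl : (String.ofList f0 :: String.ofList f1 :: List.map String.ofList fs).getLast (by simp)
          = String.ofList ((f0 :: f1 :: fs).getLast (by simp)) :=
        List.getLast_map (f := String.ofList) (l := f0 :: f1 :: fs) (by simp)
      rw [hgl]
      have hcomp : (String.toList ∘ (fun s => PySem.Str.strip s) ∘ String.ofList)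
          = PySem.Chars.strip := by
        funext x
        simp [Function.comp]
      rw [hcomp]
      rw [List.getLast_cons (by simp : (f1 :: fs) ≠ [])]
      simp
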